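-- pv_equiv track=rewrite | github.com/pypi-data/pypi-mirror-392 | packages/util-intelligence/util_intelligence-0.8.11.tar.gz/util_intelligence-0.8.11/src/util_intelligence/algorithm.py | boxes_to_layout
-- ===== SOURCE A (Python) =====
-- def boxes_to_layout(boxes, open_end=True, tolerance=0):
--     xpos = []
--     ypos = []
--     if not open_end:
--         boxes = [(box[0], box[1], box[2] + 1, box[3] + 1) for box in boxes]
--     for box in boxes:
--         xpos += [box[0], box[2]]
--         ypos += [box[1], box[3]]
--     xpos, ypos = sorted(xpos), sorted(ypos)
--
--     def make_layout(axis):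
--         last_pos = -tolerance - 1
--         index = -1
--         mapping = {}
--         for pos in axis:
--             if pos - last_pos > tolerance:
--                 index += 1
--             mapping[pos] = index
--             last_pos = pos
--         return mapping
--
--     xmap, ymap = make_layout(xpos), make_layout(ypos)
--     result = [(xmap[x0], ymap[y0], xmap[x1], ymap[y1]) for x0, y0, x1, y1 in boxes]
--     return result
-- ===== SOURCE B (Python) =====
-- def boxes_to_layout(boxes, open_end=True, tolerance=0):
--     if not open_end:
--         boxes = [(x0, y0, x1 + 1, y1 + 1) for x0, y0, x1, y1 in boxes]
--
--     def cluster_starts(values):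
--         # sorted positions at which a new cluster begins (gap > tolerance)
--         starts = []
--         last = -tolerance - 1
--         for v in sorted(values):
--             if v - last > tolerance:
--                 starts.append(v)
--             last = v
--         return starts
--
--     def rank(starts, v):
--         # bisect_right(starts, v) - 1, hand-written (no imports in this module)
--         lo, hi = 0, len(starts)
--         while lo < hi:
--             mid = (lo + hi) // 2
--             if v < starts[mid]:
--                 hi = mid
--             else:
--                 lo = mid + 1
--         return lo - 1
--
--     xstarts = cluster_starts([c for b in boxes for c in (b[0], b[2])])
--     ystarts = cluster_starts([c for b in boxes for c in (b[1], b[3])])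
--     return [(rank(xstarts, x0), rank(ystarts, y0),
--              rank(xstarts, x1), rank(ystarts, y1))
--             for x0, y0, x1, y1 in boxes]
-- ===== Notes on version B (the rewrite author's own statement) =====
-- stated objective: alternative
-- what changed: Replaces A's per-position dict of cluster indices with a compact sorted list of cluster-start positions, answering each coordinate by a hand-written bisect_right (binary search) minus one instead of a dict lookup.
import Mathlib
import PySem

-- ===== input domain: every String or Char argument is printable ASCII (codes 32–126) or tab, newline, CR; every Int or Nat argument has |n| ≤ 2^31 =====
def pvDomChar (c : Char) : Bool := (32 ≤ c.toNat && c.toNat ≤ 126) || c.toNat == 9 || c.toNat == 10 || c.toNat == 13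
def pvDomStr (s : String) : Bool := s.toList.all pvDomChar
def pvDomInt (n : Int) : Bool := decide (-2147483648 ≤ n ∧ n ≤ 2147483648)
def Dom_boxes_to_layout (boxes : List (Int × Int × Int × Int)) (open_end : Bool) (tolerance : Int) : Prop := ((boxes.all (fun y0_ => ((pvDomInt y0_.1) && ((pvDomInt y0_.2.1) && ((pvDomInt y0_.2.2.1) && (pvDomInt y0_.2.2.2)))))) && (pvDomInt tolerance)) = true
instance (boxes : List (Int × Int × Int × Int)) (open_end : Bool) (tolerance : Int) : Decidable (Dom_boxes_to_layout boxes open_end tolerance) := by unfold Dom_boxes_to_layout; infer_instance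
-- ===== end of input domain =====

-- B replaces A's per-position dict of cluster indices by a compact sorted table of cluster-start
-- positions queried with a hand-written bisect_right; same results, alternative algorithm.

-- ===== PORT A =====
-- Python's nested `make_layout` loop: state (last_pos, index, mapping)
def makeLayoutStep (tolerance : Int) (st : Int × Int × PySem.Dict Int Int) (pos : Int) : Int × Int × PySem.Dict Int Int :=
  let index := if pos - st.1 > tolerance then st.2.1 + 1 else st.2.1
  (pos, index, st.2.2.insert pos index)

def makeLayout (axis : List Int) (tolerance : Int) : PySem.Dict Int Int :=
  (axis.foldl (makeLayoutStep tolerance) (-tolerance - 1, -1, PySem.Dict.empty)).2.2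

def boxes_to_layout (boxes : List (Int × Int × Int × Int)) (open_end : Bool) (tolerance : Int) : List (Int × Int × Int × Int) :=
  let boxes1 := if !open_end then boxes.map (fun b => (b.1, b.2.1, b.2.2.1 + 1, b.2.2.2 + 1)) else boxes
  let xpos := boxes1.foldl (fun acc b => acc ++ [b.1, b.2.2.1]) []
  let ypos := boxes1.foldl (fun acc b => acc ++ [b.2.1, b.2.2.2]) []
  let xpos := PySem.List.sorted xpos (fun v => v) false
  let ypos := PySem.List.sorted ypos (fun v => v) false
  let xmap := makeLayout xpos tolerance
  let ymap := makeLayout ypos tolerance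
  -- xmap[x0] etc.: every key looked up was inserted by make_layout, so getD never hits its default
  boxes1.map (fun b => (xmap.getD b.1 0, ymap.getD b.2.1 0, xmap.getD b.2.2.1 0, ymap.getD b.2.2.2 0))

-- ===== PORT B =====
-- Source B's `cluster_starts` loop: state (starts, last)
def clusterStep (tolerance : Int) (st : List Int × Int) (v : Int) : List Int × Int :=
  (if v - st.2 > tolerance then st.1 ++ [v] else st.1, v)

def clusterStarts (values : List Int) (tolerance : Int) : List Int :=
  ((PySem.List.sorted values (fun v => v) false).foldl (clusterStep tolerance) ([], -tolerance - 1)).1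

-- Source B's `rank`: a hand-written bisect_right (CPython's algorithm verbatim) = PySem.List.bisectRight
def rankStart (starts : List Int) (v : Int) : Int :=
  (PySem.List.bisectRight starts v : Int) - 1

def boxes_to_layout_alt (boxes : List (Int × Int × Int × Int)) (open_end : Bool) (tolerance : Int) : List (Int × Int × Int × Int) :=
  let boxes1 := if !open_end then boxes.map (fun b => (b.1, b.2.1, b.2.2.1 + 1, b.2.2.2 + 1)) else boxes
  let xstarts := clusterStarts (boxes1.flatMap (fun b => [b.1, b.2.2.1])) tolerance
  let ystarts := clusterStarts (boxes1.flatMap (fun b => [b.2.1, b.2.2.2])) tolerance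
  boxes1.map (fun b => (rankStart xstarts b.1, rankStart ystarts b.2.1, rankStart xstarts b.2.2.1, rankStart ystarts b.2.2.2))

-- ===== PRECONDITION & SPEC =====
def Spec_boxes_to_layout (boxes : List (Int × Int × Int × Int)) (open_end : Bool) (tolerance : Int) (out : List (Int × Int × Int × Int)) : Prop := out = boxes_to_layout_alt boxes open_end tolerance
instance (boxes : List (Int × Int × Int × Int)) (open_end : Bool) (tolerance : Int) (out : List (Int × Int × Int × Int)) : Decidable (Spec_boxes_to_layout boxes open_end tolerance out) := by unfold Spec_boxes_to_layout; infer_instance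

-- ===== CLAIM (what is proved, stated in full; the proofs are below) =====
def Claim_equal_boxes_to_layout : Prop := ∀ (boxes : List (Int × Int × Int × Int)) (open_end : Bool) (tolerance : Int), Dom_boxes_to_layout boxes open_end tolerance → Spec_boxes_to_layout boxes open_end tolerance (boxes_to_layout boxes open_end tolerance)

-- ===== LEMMAS AND PROOFS =====

-- A's dict loop never touches the binding of a key that does not occur in the rest of the axis
lemma layout_getD_not_mem (tol : Int) (l : List Int) :
    ∀ (st : Int × Int × PySem.Dict Int Int) (k d : Int), k ∉ l →
      ((l.foldl (makeLayoutStep tol) st).2.2).getD k d = st.2.2.getD k d := by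
  induction l with
  | nil => intro st k d _; rfl
  | cons p rest ih =>
    intro st k d hk
    simp only [List.foldl_cons]
    simp only [List.mem_cons, not_or] at hk
    rw [ih _ k d hk.2]
    simp only [makeLayoutStep]
    rw [PySem.Dict.getD_insert, if_neg hk.1]

-- Source B's starts loop only ever appends: the accumulator is a prefix of the result
lemma starts_append (tol : Int) (l : List Int) :
    ∀ (starts : List Int) (lp : Int),
      (l.foldl (clusterStep tol) (starts, lp)).1
        = starts ++ (l.foldl (clusterStep tol) ([], lp)).1 := by
  induction l with
  | nil => intro starts lp; simp
  | cons v rest ih =>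
    intro starts lp
    simp only [List.foldl_cons, clusterStep]
    by_cases hc : v - lp > tol
    · simp only [if_pos hc, List.nil_append]
      rw [ih (starts ++ [v]) v, ih [v] v, List.append_assoc]
    · simp only [if_neg hc]
      rw [ih starts v]

-- every start produced by the loop comes from the accumulator or from the scanned list
lemma mem_starts (tol : Int) (l : List Int) :
    ∀ (st : List Int × Int) (s : Int),
      s ∈ (l.foldl (clusterStep tol) st).1 → s ∈ st.1 ∨ s ∈ l := by
  induction l with
  | nil => intro st s h; exact Or.inl h
  | cons v rest ih =>
    intro st s h
    simp only [List.foldl_cons] at h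
    rcases ih _ s h with h' | h'
    · simp only [clusterStep] at h'
      by_cases hc : v - st.2 > tol
    
      · rw [if_pos hc] at h'
        rcases List.mem_append.mp h' with h'' | h''
        · exact Or.inl h''
        · simp at h''; subst h''; simp
      · rw [if_neg hc] at h'
        exact Or.inl h'
    · simp [h']

-- the starts table is sorted
lemma starts_pairwise (tol : Int) (l : List Int) (hl : l.Pairwise (· ≤ ·)) :
    ∀ (starts : List Int) (lp : Int), starts.Pairwise (· ≤ ·) →
      (∀ s ∈ starts, ∀ x ∈ l, s ≤ x) →
      ((l.foldl (clusterStep tol) (starts, lp)).1).Pairwise (· ≤ ·) := by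
  induction l with
  | nil => intro starts lp hs _; exact hs
  | cons v rest ih =>
    intro starts lp hs hle
    rw [List.pairwise_cons] at hl
    simp only [List.foldl_cons, clusterStep]
    by_cases hc : v - lp > tol
    · simp only [if_pos hc]
      refine ih hl.2 (starts ++ [v]) v ?_ ?_
      · refine List.pairwise_append.mpr ⟨hs, by simp, ?_⟩
        intro a ha w hw
        have hwv : w = v := by simpa using hw
        rw [hwv]
        exact hle a ha v (by simp)
      · intro s hs' x hx
        rcases List.mem_append.mp hs' with h' | h'
        · exact hle s h' x (by simp [hx])
        · have hsv : s = v := by simpa using h'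
          rw [hsv]
          exact hl.1 x hx
    · simp only [if_neg hc]
      refine ih hl.2 starts v hs ?_
      intro s hs' x hx
      exact hle s hs' x (by simp [hx])

-- core invariant: on a sorted axis, A's dict index of pos = (#cluster starts ≤ pos) - 1
lemma layout_eq_countP (tol : Int) (l : List Int) (hl : l.Pairwise (· ≤ ·)) :
    ∀ (lp idx : Int) (starts : List Int) (m : PySem.Dict Int Int),
      (∀ s ∈ starts, ∀ x ∈ l, s ≤ x) →
      idx = (starts.length : Int) - 1 →
      ∀ pos ∈ l,
        ((l.foldl (makeLayoutStep tol) (lp, idx, m)).2.2).getD pos 0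
          = (((l.foldl (clusterStep tol) (starts, lp)).1).countP (fun s => decide (s ≤ pos)) : Int) - 1 := by
  induction l with
  | nil => intro _ _ _ _ _ _ pos hpos; cases hpos
  | cons p rest ih =>
    intro lp idx starts m hle hidx pos hpos
    rw [List.pairwise_cons] at hl
    have hstep :
        ∀ (idx' : Int) (starts' : List Int),
          idx' = (starts'.length : Int) - 1 →
          (∀ s ∈ starts', s ≤ p) →
          (∀ s ∈ starts', ∀ x ∈ rest, s ≤ x) →
          ((rest.foldl (makeLayoutStep tol) (p, idx', m.insert p idx')).2.2).getD pos 0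
            = (((rest.foldl (clusterStep tol) (starts', p)).1).countP (fun s => decide (s ≤ pos)) : Int) - 1 := by
      intro idx' starts' hidx' hsp hsrest
      by_cases hmem : pos ∈ rest
      · exact ih hl.2 p idx' starts' (m.insert p idx') hsrest hidx' pos hmem
      · have hp : pos = p := (List.mem_cons.mp hpos).resolve_right hmem
        subst hp
        rw [layout_getD_not_mem tol rest _ pos 0 hmem]
        rw [PySem.Dict.getD_insert_self]
        rw [starts_append tol rest starts' pos]
        rw [List.countP_append]
        have h1 : starts'.countP (fun s => decide (s ≤ pos)) = starts'.length := by
          apply List.countP_eq_length.mpr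
          intro s hs; simpa using hsp s hs
        have h2 : ((rest.foldl (clusterStep tol) ([], pos)).1).countP (fun s => decide (s ≤ pos)) = 0 := by
          apply List.countP_eq_zero.mpr
          intro s hs
          rcases mem_starts tol rest ([], pos) s hs with h | h
          · cases h
          · have : pos ≤ s := hl.1 s h
            have hne : s ≠ pos := by intro he; subst he; exact hmem h
            simp; omega
        rw [h1, h2]; omega
    simp only [List.foldl_cons, makeLayoutStep, clusterStep]
    by_cases hc : p - lp > tol
    · simp only [if_pos hc]
      refine hstep (idx + 1) (starts ++ [p]) (by simp; omega) ?_ ?_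
      · intro s hs
        rcases List.mem_append.mp hs with h | h
        · exact hle s h p (by simp)
        · simp at h; omega
      · intro s hs x hx
        rcases List.mem_append.mp hs with h | h
        · exact hle s h x (by simp [hx])
        · simp at h; subst h; exact hl.1 x hx
    · simp only [if_neg hc]
      refine hstep idx starts hidx ?_ ?_
      · intro s hs; exact hle s hs p (by simp)
      · intro s hs x hx; exact hle s hs x (by simp [hx])

-- on a list characterised by a cut point r, countP (· ≤ v) is exactly r
lemma countP_eq_of_char (a : List Int) (v : Int) (r : Nat) (hr : r ≤ a.length)
    (h1 : ∀ j (hj : j < a.length), j < r → a[j] ≤ v)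
    (h2 : ∀ j (hj : j < a.length), r ≤ j → v < a[j]) :
    a.countP (fun s => decide (s ≤ v)) = r := by
  conv_lhs => rw [← List.take_append_drop r a]
  rw [List.countP_append]
  have ht : (a.take r).countP (fun s => decide (s ≤ v)) = r := by
    have hlen : (a.take r).length = r := by simp [Nat.min_eq_left hr]
    rw [List.countP_eq_length.mpr, hlen]
    intro x hx
    obtain ⟨i, hi, hix⟩ := List.mem_iff_getElem.mp hx
    rw [hlen] at hi
    have hi' : i < a.length := lt_of_lt_of_le hi hr
    have : x = a[i] := by rw [← hix]; simp [List.getElem_take]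
    subst this
    simpa using h1 i hi' hi
  have hd : (a.drop r).countP (fun s => decide (s ≤ v)) = 0 := by
    apply List.countP_eq_zero.mpr
    intro x hx
    obtain ⟨i, hi, hix⟩ := List.mem_iff_getElem.mp hx
    have hi' : r + i < a.length := by simp at hi; omega
    have : x = a[r + i] := by rw [← hix]; simp [List.getElem_drop]
    subst this
    have := h2 (r + i) hi' (by omega)
    simp; omega
  omega

-- wiring per axis: B's rank into the starts table equals A's dict lookup
lemma rank_eq_getD (values : List Int) (tol : Int) (c : Int) (hc : c ∈ values) :
    rankStart (clusterStarts values tol) c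
      = (makeLayout (PySem.List.sorted values (fun v => v) false) tol).getD c 0 := by
  have hl : (PySem.List.sorted values (fun v => v) false).Pairwise (· ≤ ·) :=
    PySem.List.sorted_pairwise values (fun v => v)
  have hc' : c ∈ PySem.List.sorted values (fun v => v) false :=
    (PySem.List.mem_sorted _ _ _ _).mpr hc
  have hmain := layout_eq_countP tol _ hl (-tol - 1) (-1) [] PySem.Dict.empty
      (by intro s hs; cases hs) (by simp) c hc'
  have hsorted : (clusterStarts values tol).Pairwise (· ≤ ·) :=
    starts_pairwise tol _ hl [] (-tol - 1) (by simp) (by intro s hs; cases hs)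
  obtain ⟨hble, hb1, hb2⟩ := PySem.List.bisectRight_spec (clusterStarts values tol) c hsorted
  have hcount : (clusterStarts values tol).countP (fun s => decide (s ≤ c))
      = PySem.List.bisectRight (clusterStarts values tol) c := by
    apply countP_eq_of_char _ _ _ hble
    · intro j hj hjr; exact hb1 j hj hjr
    · intro j hj hjr; exact hb2 j hj hjr
  unfold rankStart makeLayout
  rw [hmain, ← hcount]
  rfl

-- ===== VERDICT (by name: the statement is the Claim_ definition above) =====
theorem boxes_to_layout_spec : Claim_equal_boxes_to_layout := by
  unfold Claim_equal_boxes_to_layout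
  intro boxes open_end tolerance _
  unfold Spec_boxes_to_layout boxes_to_layout boxes_to_layout_alt
  simp only [PySem.List.foldl_append_eq_flatMap, List.nil_append]
  apply List.map_congr_left
  intro b hb
  have hx0 : b.1 ∈ (if !open_end then boxes.map (fun b => (b.1, b.2.1, b.2.2.1 + 1, b.2.2.2 + 1)) else boxes).flatMap (fun b => [b.1, b.2.2.1]) :=
    List.mem_flatMap.mpr ⟨b, hb, by simp⟩
  have hx1 : b.2.2.1 ∈ (if !open_end then boxes.map (fun b => (b.1, b.2.1, b.2.2.1 + 1, b.2.2.2 + 1)) else boxes).flatMap (fun b => [b.1, b.2.2.1]) :=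
    List.mem_flatMap.mpr ⟨b, hb, by simp⟩
  have hy0 : b.2.1 ∈ (if !open_end then boxes.map (fun b => (b.1, b.2.1, b.2.2.1 + 1, b.2.2.2 + 1)) else boxes).flatMap (fun b => [b.2.1, b.2.2.2]) :=
    List.mem_flatMap.mpr ⟨b, hb, by simp⟩
  have hy1 : b.2.2.2 ∈ (if !open_end then boxes.map (fun b => (b.1, b.2.1, b.2.2.1 + 1, b.2.2.2 + 1)) else boxes).flatMap (fun b => [b.2.1, b.2.2.2]) :=
    List.mem_flatMap.mpr ⟨b, hb, by simp⟩
  rw [rank_eq_getD _ tolerance _ hx0, rank_eq_getD _ tolerance _ hy0,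
      rank_eq_getD _ tolerance _ hx1, rank_eq_getD _ tolerance _ hy1]
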